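-- pv_equiv track=rewrite | github.com/VaclavTomecek/Kryptologie | ADFG(V)X/ADFGVX.py | adfgvx_encrypt
-- ===== SOURCE A (Python) =====
-- def split_into_groups(text, key):
--     size = len(key)
--     if size == 0:
--         raise ValueError("Klíč pro rozdělení skupin nesmí být prázdný.")
--     text = text.replace(" ", "").strip()
--     groups = [text[i:i + size] for i in range(0, len(text), size)]
--     return ' '.join(groups)
--
-- def find_position_in_matrix(matrix, char):
--     for i in range(1, len(matrix)):
--         for j in range(1, len(matrix[i])):
--             if matrix[i][j] == char:
--                 return matrix[0][i], matrix[j][0]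
--     return None
--
-- def columnar_transposition(text, key):
--     col_count = len(key)
--     grid = ['' for _ in range(col_count)]
--     # Rozdělení textu do sloupců
--     for i in range(len(text)):
--         grid[i % col_count] += text[i]
--
--     key_index = sorted(range(len(key)), key=lambda k: key[k])
--     return ''.join(grid[i] for i in key_index)
--
-- def adfgvx_encrypt(text, key, matrix):
--
--     encrypted_text = ''
--     for char in text:
--         position = find_position_in_matrix(matrix, char)
--         if position:
--             encrypted_text += position[0] + position[1]
--         else:
--             raise ValueError(f"Znak '{char}' nebyl nalezen v matici.")
--
--     encrypted_text = columnar_transposition(encrypted_text, key)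
--     return split_into_groups(encrypted_text, key)
-- ===== SOURCE B (Python) =====
-- def adfgvx_encrypt(text, key, matrix):
--     # Build the substitution table once, then do O(1) lookups per character.
--     pos = {}
--     for i in range(1, len(matrix)):
--         row = matrix[i]
--         for j in range(1, len(row)):
--             pos.setdefault(row[j], matrix[0][i] + matrix[j][0])
--     pieces = []
--     for ch in text:
--         p = pos.get(ch)
--         if p is None:
--             raise ValueError(f"Znak '{ch}' nebyl nalezen v matici.")
--         pieces.append(p)
--     s = ''.join(pieces)
--     n = len(key)
--     order = sorted(range(n), key=lambda k: key[k])
--     # Gather each column directly with a stride slice instead of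
--     # distributing characters round-robin into a grid.
--     t = ''.join(s[c::n] for c in order)
--     u = t.replace(' ', '').strip()
--     return ' '.join(u[i:i + n] for i in range(0, len(u), n))
-- ===== Notes on version B (the rewrite author's own statement) =====
-- stated objective: faster
-- what changed: B builds the cell->labels substitution table once as a dict (setdefault keeps the first occurrence, matching A's scan order) so the per-character full-matrix scan disappears, and gathers each transposition column directly with a stride slice s[c::n] instead of distributing characters round-robin into a grid.
-- outside the precondition, e.g. on adfgvx_encrypt('a', 'k', [['h', 'r'], ['c', 'a'], ['x', 'y', 'z']]): A returns 'r c', B raises IndexError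
import Mathlib
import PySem

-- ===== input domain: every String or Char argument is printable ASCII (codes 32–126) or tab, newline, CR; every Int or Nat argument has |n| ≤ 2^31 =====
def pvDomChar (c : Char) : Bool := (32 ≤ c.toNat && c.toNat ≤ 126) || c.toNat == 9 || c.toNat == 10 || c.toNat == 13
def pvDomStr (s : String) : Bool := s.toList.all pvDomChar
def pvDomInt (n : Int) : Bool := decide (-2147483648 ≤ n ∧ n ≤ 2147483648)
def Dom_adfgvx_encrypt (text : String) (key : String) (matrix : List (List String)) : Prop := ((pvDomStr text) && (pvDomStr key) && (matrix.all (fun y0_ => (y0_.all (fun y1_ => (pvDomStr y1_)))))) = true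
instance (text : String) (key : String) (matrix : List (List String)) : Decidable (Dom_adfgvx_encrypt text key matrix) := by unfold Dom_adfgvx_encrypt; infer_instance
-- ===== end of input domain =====

-- B builds the substitution table once as a dict and gathers transposition columns by
-- stride slices, replacing A's per-character full-matrix scan and round-robin grid fill (objective: faster).

-- ===== PORT A =====
-- inner loop of find_position_in_matrix: for j in range(1, len(matrix[i])): if matrix[i][j] == char: return matrix[0][i], matrix[j][0]
-- (label accesses use pyGetD with default ""; under Pre_ every such access is in range, matching Python exactly)
def fpimCols (matrix : List (List String)) (char : String) (i : Int) : Int → List String → Option (String × String)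
  | _, [] => none
  | j, cell :: rest =>
    if cell = char then
      some (PySem.List.pyGetD (PySem.List.pyGetD matrix 0 []) i "",
            PySem.List.pyGetD (PySem.List.pyGetD matrix j []) 0 "")
    else fpimCols matrix char i (j + 1) rest

-- outer loop of find_position_in_matrix: for i in range(1, len(matrix))
def fpimRows (matrix : List (List String)) (char : String) : Int → List (List String) → Option (String × String)
  | _, [] => none
  | i, row :: rest =>
    match fpimCols matrix char i 1 (row.drop 1) with
    | some p => some p
    | none => fpimRows matrix char (i + 1) rest

def find_position_in_matrix (matrix : List (List String)) (char : String) : Option (String × String) :=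
  fpimRows matrix char 1 (matrix.drop 1)

-- encryption loop: encrypted_text += position[0] + position[1]; none = the ValueError branch
def adfgvxSubstA (matrix : List (List String)) : List Char → List Char → Option (List Char)
  | acc, [] => some acc
  | acc, c :: rest =>
    match find_position_in_matrix matrix (String.ofList [c]) with
    | some p => adfgvxSubstA matrix (acc ++ (p.1.toList ++ p.2.toList)) rest
    | none => none

-- grid[i % col_count] += text[i]  (col_count = 0 only when key = "", where Python raises: excluded by Pre_)
def ctFill (n : Nat) : List (List Char) → Nat → List Char → List (List Char)
  | g, _, [] => g
  | g, i, c :: rest => ctFill n (g.modify (i % n) (fun col => col ++ [c])) (i + 1) rest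

def columnar_transposition (s : List Char) (key : List Char) : List Char :=
  let grid := ctFill key.length (List.replicate key.length []) 0 s
  let keyIndex := PySem.List.sorted (PySem.List.pyRange 0 key.length 1)
      (fun k => PySem.List.pyGetD key k ' ') false
  PySem.Chars.join [] (keyIndex.map (fun i => PySem.List.pyGetD grid i []))

def split_into_groups (s : List Char) (key : List Char) : List Char :=
  let size := key.length
  let t := PySem.Chars.strip (PySem.Chars.replace s [' '] [])
  PySem.Chars.join [' ']
    ((PySem.List.pyRange 0 t.length size).map (fun i => PySem.List.slice t (some i) (some (i + size))))

def adfgvx_encrypt (text : String) (key : String) (matrix : List (List String)) : String :=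
  match adfgvxSubstA matrix [] text.toList with
  | none => ""  -- ValueError: unreachable under Pre_
  | some e => String.ofList (split_into_groups (columnar_transposition e key.toList) key.toList)

-- ===== PORT B =====
-- pos.setdefault(row[j], matrix[0][i] + matrix[j][0]) over all cells, rows first
def posTable (matrix : List (List String)) : PySem.Dict String (List Char) :=
  (PySem.List.enumerate (matrix.drop 1) 1).foldl (fun d ir =>
    (PySem.List.enumerate (ir.2.drop 1) 1).foldl (fun d2 jc =>
      d2.setdefault jc.2
        ((PySem.List.pyGetD (PySem.List.pyGetD matrix 0 []) ir.1 "").toList ++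
         (PySem.List.pyGetD (PySem.List.pyGetD matrix jc.1 []) 0 "").toList)) d)
    PySem.Dict.empty

-- pieces.append(pos[ch]); none = the ValueError branch
def piecesB (pos : PySem.Dict String (List Char)) : List Char → Option (List (List Char))
  | [] => some []
  | c :: rest =>
    match pos.get? (String.ofList [c]) with
    | none => none
    | some p => (piecesB pos rest).map (fun ps => p :: ps)

-- ''.join(s[c::n] for c in sorted(range(n), key=lambda k: key[k]))
def transposeB (s : List Char) (key : List Char) : List Char :=
  PySem.Chars.join []
    ((PySem.List.sorted (PySem.List.pyRange 0 key.length 1)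
        (fun k => PySem.List.pyGetD key k ' ') false).map
      (fun c => (PySem.List.slice? s (some c) none (key.length : Int)).getD []))

-- ' '.join(u[i:i+n] for i in range(0, len(u), n)) after u = t.replace(' ','').strip()
def regroupB (t : List Char) (n : Nat) : List Char :=
  let u := PySem.Chars.strip (PySem.Chars.replace t [' '] [])
  PySem.Chars.join [' ']
    ((PySem.List.pyRange 0 u.length n).map (fun i => PySem.List.slice u (some i) (some (i + n))))

def adfgvx_encrypt_alt (text : String) (key : String) (matrix : List (List String)) : String :=
  match piecesB (posTable matrix) text.toList with
  | none => ""  -- ValueError: unreachable under Pre_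
  | some ps =>
      String.ofList (regroupB (transposeB (PySem.Chars.join [] ps) key.toList) key.toList.length)

-- ===== PRECONDITION & SPEC =====
-- A raises outside Pre_: empty key (ValueError/ZeroDivisionError) and text characters absent from the
-- matrix body (ValueError).  The shape bounds (header row at least as long as the matrix, body rows
-- nonempty and no longer than the matrix) keep every label access matrix[0][i] / matrix[j][0] in range;
-- they mildly narrow Pre_: on some ragged matrices A happens to return while B's precomputed table
-- raises IndexError (see the cite in claim.json).
def Pre_adfgvx_encrypt (text : String) (key : String) (matrix : List (List String)) : Prop :=
  key ≠ "" ∧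
  (matrix.isEmpty || decide (matrix.length ≤ matrix.headI.length)) = true ∧
  (matrix.tail.all (fun row => !row.isEmpty && decide (row.length ≤ matrix.length))) = true ∧
  (text.toList.all (fun c =>
    matrix.tail.any (fun row => row.tail.any (fun cell => cell.toList == [c])))) = true
instance (text : String) (key : String) (matrix : List (List String)) : Decidable (Pre_adfgvx_encrypt text key matrix) := by unfold Pre_adfgvx_encrypt; infer_instance

def pvWitness_adfgvx_encrypt : String × String × List (List String) :=
  ("ab", "ck", [["0", "A", "D"], ["A", "a", "b"], ["D", "c", "d"]])

def Spec_adfgvx_encrypt (text : String) (key : String) (matrix : List (List String)) (out : String) : Prop := out = adfgvx_encrypt_alt text key matrix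
instance (text : String) (key : String) (matrix : List (List String)) (out : String) : Decidable (Spec_adfgvx_encrypt text key matrix out) := by unfold Spec_adfgvx_encrypt; infer_instance

-- ===== CLAIM (what is proved, stated in full; the proofs are below) =====
def Claim_equal_adfgvx_encrypt : Prop := ∀ (text : String) (key : String) (matrix : List (List String)), Dom_adfgvx_encrypt text key matrix → Pre_adfgvx_encrypt text key matrix → Spec_adfgvx_encrypt text key matrix (adfgvx_encrypt text key matrix)

-- ===== LEMMAS AND PROOFS =====

-- the row-major scan list of (cell, stored label pair) that both substitutions follow
def scanList (matrix : List (List String)) : List (String × List Char) :=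
  (PySem.List.enumerate (matrix.drop 1) 1).flatMap (fun ir =>
    (PySem.List.enumerate (ir.2.drop 1) 1).map (fun jc =>
      (jc.2,
       (PySem.List.pyGetD (PySem.List.pyGetD matrix 0 []) ir.1 "").toList ++
       (PySem.List.pyGetD (PySem.List.pyGetD matrix jc.1 []) 0 "").toList)))

theorem posTable_eq_foldl (matrix : List (List String)) :
    posTable matrix = (scanList matrix).foldl (fun d p => d.setdefault p.1 p.2) PySem.Dict.empty := by
  unfold posTable scanList
  rw [List.foldl_flatMap]
  simp only [List.foldl_map]

theorem get?_foldl_setdefault (L : List (String × List Char)) (d : PySem.Dict String (List Char)) (k : String) :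
    ((L.foldl (fun d p => d.setdefault p.1 p.2) d).get? k)
      = (d.get? k).or ((L.find? (fun p => p.1 == k)).map (·.2)) := by
  induction L generalizing d with
  | nil => simp
  | cons p L ih =>
    obtain ⟨k0, v0⟩ := p
    simp only [List.foldl_cons, List.find?_cons]
    rw [ih]
    by_cases hk : k0 = k
    · subst hk
      rw [PySem.Dict.get?_setdefault_self]
      cases hd : d.get? k0 <;> simp [Option.or]
    · have hb : (k0 == k) = false := by simp [hk]
      rw [PySem.Dict.get?_setdefault_of_ne _ _ (fun h => hk h.symm)]
      simp [hb]

theorem fpimCols_eq_find (matrix : List (List String)) (char : String) (i : Int) (cells : List String) :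
    ∀ j : Int,
      (fpimCols matrix char i j cells).map (fun p => p.1.toList ++ p.2.toList)
        = (((PySem.List.enumerate cells j).map (fun jc =>
              (jc.2,
               (PySem.List.pyGetD (PySem.List.pyGetD matrix 0 []) i "").toList ++
               (PySem.List.pyGetD (PySem.List.pyGetD matrix jc.1 []) 0 "").toList))).find?
            (fun p => p.1 == char)).map (·.2) := by
  induction cells with
  | nil => intro j; simp [fpimCols, PySem.List.enumerate]
  | cons cell rest ih =>
    intro j
    rw [PySem.List.enumerate_cons]
    simp only [List.map_cons, List.find?_cons, fpimCols]
    by_cases h : cell = char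
    · simp [h]
    · have hb : (cell == char) = false := by simp [h]
      simp only [hb, if_neg h]
      exact ih (j + 1)

theorem fpimRows_eq_scan (matrix : List (List String)) (char : String) :
    ∀ (rows : List (List String)) (i : Int),
      (fpimRows matrix char i rows).map (fun p => p.1.toList ++ p.2.toList)
        = (((PySem.List.enumerate rows i).flatMap (fun ir =>
              (PySem.List.enumerate (ir.2.drop 1) 1).map (fun jc =>
                (jc.2,
                 (PySem.List.pyGetD (PySem.List.pyGetD matrix 0 []) ir.1 "").toList ++
                 (PySem.List.pyGetD (PySem.List.pyGetD matrix jc.1 []) 0 "").toList)))).find?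
            (fun p => p.1 == char)).map (·.2) := by
  intro rows
  induction rows with
  | nil => intro i; simp [fpimRows, PySem.List.enumerate]
  | cons row rest ih =>
    intro i
    rw [PySem.List.enumerate_cons]
    simp only [List.flatMap_cons, List.find?_append]
    have hrw := fpimCols_eq_find matrix char i (row.drop 1) 1
    cases hc : fpimCols matrix char i 1 (row.drop 1) with
    | some p =>
      rw [hc] at hrw
      cases hrow : ((PySem.List.enumerate (row.drop 1) 1).map (fun jc =>
          (jc.2,
           (PySem.List.pyGetD (PySem.List.pyGetD matrix 0 []) i "").toList ++
           (PySem.List.pyGetD (PySem.List.pyGetD matrix jc.1 []) 0 "").toList))).find?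
          (fun p => p.1 == char) with
      | none => rw [hrow] at hrw; simp at hrw
      | some q =>
        rw [hrow] at hrw
        simp only [Option.map_some, Option.some.injEq] at hrw
        simp only [fpimRows, hc, Option.map_some, Option.some_or]
        rw [hrw]
    | none =>
      rw [hc] at hrw
      have hrow : ((PySem.List.enumerate (row.drop 1) 1).map (fun jc =>
          (jc.2,
           (PySem.List.pyGetD (PySem.List.pyGetD matrix 0 []) i "").toList ++
           (PySem.List.pyGetD (PySem.List.pyGetD matrix jc.1 []) 0 "").toList))).find?
          (fun p => p.1 == char) = none := by
        cases h' : ((PySem.List.enumerate (row.drop 1) 1).map (fun jc =>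
          (jc.2,
           (PySem.List.pyGetD (PySem.List.pyGetD matrix 0 []) i "").toList ++
           (PySem.List.pyGetD (PySem.List.pyGetD matrix jc.1 []) 0 "").toList))).find?
          (fun p => p.1 == char) with
        | none => rfl
        | some q => rw [h'] at hrw; simp at hrw
      simp only [fpimRows, hc, hrow, Option.none_or]
      exact ih (i + 1)

theorem fpim_eq_scan (matrix : List (List String)) (char : String) :
    (find_position_in_matrix matrix char).map (fun p => p.1.toList ++ p.2.toList)
      = ((scanList matrix).find? (fun p => p.1 == char)).map (·.2) := by
  unfold find_position_in_matrix scanList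
  exact fpimRows_eq_scan matrix char (matrix.drop 1) 1

theorem posTable_get (matrix : List (List String)) (char : String) :
    (posTable matrix).get? char
      = (find_position_in_matrix matrix char).map (fun p => p.1.toList ++ p.2.toList) := by
  rw [posTable_eq_foldl, get?_foldl_setdefault, fpim_eq_scan]
  simp

theorem substA_eq_pieces (matrix : List (List String)) (cs : List Char) (acc : List Char) :
    adfgvxSubstA matrix acc cs
      = (piecesB (posTable matrix) cs).map (fun ps => acc ++ ps.flatten) := by
  induction cs generalizing acc with
  | nil => simp [adfgvxSubstA, piecesB]
  | cons c rest ih =>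
    simp only [adfgvxSubstA, piecesB, posTable_get]
    cases h : find_position_in_matrix matrix (String.ofList [c]) with
    | none => simp
    | some p =>
      simp only [Option.map_some]
      rw [ih]
      cases piecesB (posTable matrix) rest <;> simp

-- take every n-th element (what the stride slice s[c::n] denotes)
def everyN (n : Nat) : List Char → List Char
  | [] => []
  | c :: rest => c :: everyN n (rest.drop (n - 1))
termination_by l => l.length
decreasing_by simp

theorem everyN_nil (n : Nat) : everyN n [] = [] := by rw [everyN.eq_def]

theorem everyN_cons (n : Nat) (c : Char) (rest : List Char) :
    everyN n (c :: rest) = c :: everyN n (rest.drop (n - 1)) := by rw [everyN.eq_def]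

theorem filterMap_range_ext (f : Nat → Option Char) (q M : Nat) (h : q ≤ M)
    (hnone : ∀ k, q ≤ k → f k = none) :
    (List.range M).filterMap f = (List.range q).filterMap f := by
  rw [show M = q + (M - q) by omega, List.range_add, List.filterMap_append]
  have hdrop : List.filterMap f (List.map (fun x => q + x) (List.range (M - q))) = [] := by
    rw [List.filterMap_map]
    apply List.filterMap_eq_nil_iff.mpr
    intro a _
    show f (q + a) = none
    exact hnone _ (by omega)
  simp [hdrop]

theorem filterMap_stride (n : Nat) (hn : 0 < n) :
    ∀ (len : Nat) (l : List Char), l.length ≤ len → ∀ M : Nat, l.length ≤ M →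
      (List.range M).filterMap (fun k => l[n * k]?) = everyN n l := by
  intro len
  induction len with
  | zero =>
    intro l hl M hM
    have hnil : l = [] := by cases l <;> simp_all
    subst hnil
    simp [everyN_nil]
  | succ len ih =>
    intro l hl M hM
    cases l with
    | nil => simp [everyN_nil]
    | cons c rest =>
      simp only [List.length_cons] at hl hM
      obtain ⟨M', rfl⟩ : ∃ M', M = M' + 1 := ⟨M - 1, by omega⟩
      rw [List.range_succ_eq_map]
      have h0 : (c :: rest)[n * 0]? = some c := by simp
      simp only [List.filterMap_cons, h0, List.filterMap_map]
      rw [everyN_cons]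
      congr 1
      have htail : List.filterMap ((fun k => (c :: rest)[n * k]?) ∘ Nat.succ) (List.range M')
          = List.filterMap (fun k => (rest.drop (n - 1))[n * k]?) (List.range M') := by
        apply List.filterMap_congr
        intro k _
        show (c :: rest)[n * (k + 1)]? = (rest.drop (n - 1))[n * k]?
        have hidx : n * (k + 1) = ((n - 1) + n * k) + 1 := by
          rw [Nat.mul_succ]; omega
        rw [hidx, List.getElem?_cons_succ, ← List.getElem?_drop]
      rw [htail]
      exact ih (rest.drop (n - 1)) (by simp; omega) M' (by simp; omega)

theorem slice?_stride (xs : List Char) (c n : Nat) (hn : 0 < n) :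
    (PySem.List.slice? xs (some (c : Int)) none (n : Int)).getD [] = everyN n (xs.drop c) := by
  have hn0 : ¬((n : Int) = 0) := by omega
  have hnneg : ¬((n : Int) < 0) := by omega
  have hcneg : ¬((c : Int) < 0) := by omega
  simp only [PySem.List.slice?, PySem.List.sliceIndices, if_neg hn0, if_neg hnneg, if_neg hcneg,
    Option.getD_some]
  by_cases hc : xs.length ≤ c
  · have hmin : min (c : Int) (xs.length : Int) = (xs.length : Int) := by
      rw [min_eq_right]; exact_mod_cast hc
    rw [hmin]
    simp [List.drop_eq_nil_of_le hc, everyN_nil]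
  · push_neg at hc
    have hmin : min (c : Int) (xs.length : Int) = (c : Int) := by
      rw [min_eq_left]; exact_mod_cast hc.le
    rw [hmin]
    have hlt : ((c : Int) < (xs.length : Int)) := by exact_mod_cast hc
    rw [if_pos hlt, if_pos (by exact_mod_cast hn)]
    have hcast : ((xs.length : Int) - c + n - 1) = ((xs.length - c + n - 1 : Nat) : Int) := by
      omega
    rw [hcast, ← Int.natCast_div, Int.toNat_natCast]
    have hdm := Nat.div_add_mod (xs.length - c + n - 1) n
    have hmlt : (xs.length - c + n - 1) % n < n := Nat.mod_lt _ hn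
    have hnq : xs.length - c ≤ n * ((xs.length - c + n - 1) / n) := by omega
    have hqM : (xs.length - c + n - 1) / n ≤ xs.length - c := by
      have h1 : (xs.length - c + n - 1) / n < (xs.length - c) + 1 := by
        rw [Nat.div_lt_iff_lt_mul hn]
        have h2 := Nat.le_mul_of_pos_left (xs.length - c) hn
        have h3 : ((xs.length - c) + 1) * n = n * (xs.length - c) + n := by ring
        omega
      omega
    have hstep : ∀ k ∈ List.range ((xs.length - c + n - 1) / n),
        (fun k => xs[((c : Int) + (n : Int) * (k : Int)).toNat]?) k
          = (fun k => (xs.drop c)[n * k]?) k := by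
      intro k _
      show xs[((c : Int) + (n : Int) * (k : Int)).toNat]? = (xs.drop c)[n * k]?
      have h1 : ((c : Int) + (n : Int) * (k : Int)) = ((c + n * k : Nat) : Int) := by
        push_cast; ring
      rw [h1, Int.toNat_natCast, ← List.getElem?_drop]
    rw [List.filterMap_congr hstep]
    rw [← filterMap_range_ext (fun k => (xs.drop c)[n * k]?) ((xs.length - c + n - 1) / n)
      ((xs.drop c).length) (by simpa using hqM) ?hnone]
    · exact filterMap_stride n hn (xs.drop c).length _ le_rfl _ le_rfl
    case hnone =>
      intro k hk
      apply List.getElem?_eq_none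
      have hmul := Nat.mul_le_mul_left n hk
      simp only [List.length_drop]
      omega

theorem succMod (i n : Nat) : (i + 1) % n = (i % n + 1) % n := by
  conv_lhs => rw [Nat.add_mod]
  conv_rhs => rw [Nat.add_mod, Nat.mod_mod_of_dvd i dvd_rfl]

theorem ofs_if (c a n : Nat) (hc : c < n) (ha : a < n) :
    (c + n - a) % n = if a ≤ c then c - a else c + n - a := by
  split_ifs with h
  · rw [show c + n - a = (c - a) + n by omega, Nat.add_mod_right, Nat.mod_eq_of_lt (by omega)]
  · exact Nat.mod_eq_of_lt (by omega)

theorem ctFill_getD (n : Nat) (hn : 0 < n) :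
    ∀ (s : List Char) (i : Nat) (g : List (List Char)), g.length = n →
      ∀ c : Nat, c < n →
        (ctFill n g i s).getD c [] = g.getD c [] ++ everyN n (s.drop ((c + n - i % n) % n)) := by
  intro s
  induction s with
  | nil =>
    intro i g hg c hc
    simp [ctFill, everyN_nil]
  | cons x s ih =>
    intro i g hg c hc
    have ha : i % n < n := Nat.mod_lt _ hn
    simp only [ctFill]
    rw [ih (i + 1) _ (by simp [hg]) c hc]
    have hmod : (g.modify (i % n) (fun col => col ++ [x])).getD c []
        = if i % n = c then g.getD c [] ++ [x] else g.getD c [] := by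
      have hc1 : c < g.length := by rw [hg]; exact hc
      have hc2 : c < (g.modify (i % n) (fun col => col ++ [x])).length := by
        rw [List.length_modify]; exact hc1
      rw [List.getD_eq_getElem _ _ hc2, List.getD_eq_getElem _ _ hc1, List.getElem_modify]
    rw [hmod]
    by_cases hac : i % n = c
    · rw [if_pos hac]
      have h0 : (c + n - i % n) % n = 0 := by
        rw [hac, show c + n - c = n by omega, Nat.mod_self]
      have h1 : (c + n - (i + 1) % n) % n = n - 1 := by
        rw [succMod, hac]
        by_cases hb : c + 1 = n
        · rw [hb, Nat.mod_self, Nat.sub_zero, Nat.add_mod_right, Nat.mod_eq_of_lt hc]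
          omega
        · rw [show (c + 1) % n = c + 1 from Nat.mod_eq_of_lt (by omega),
            show c + n - (c + 1) = n - 1 by omega,
            Nat.mod_eq_of_lt (by omega)]
      rw [h0, h1]
      simp [everyN_cons, List.append_assoc]
    · rw [if_neg hac]
      have h2 : (c + n - i % n) % n = if i % n ≤ c then c - i % n else c + n - i % n :=
        ofs_if c (i % n) n hc ha
      have h3 : (c + n - (i + 1) % n) % n + 1 = (c + n - i % n) % n := by
        rw [succMod]
        by_cases hb : i % n + 1 = n
        · rw [hb, Nat.mod_self, Nat.sub_zero, Nat.add_mod_right, Nat.mod_eq_of_lt hc, h2]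
          split_ifs <;> omega
        · rw [show (i % n + 1) % n = i % n + 1 from Nat.mod_eq_of_lt (by omega),
            ofs_if c (i % n + 1) n hc (by omega), h2]
          split_ifs <;> omega
      obtain ⟨m, hm⟩ : ∃ m, (c + n - i % n) % n = m + 1 := by
        refine ⟨(c + n - i % n) % n - 1, ?_⟩
        rw [h2]; split_ifs with h <;> omega
      rw [hm, List.drop_succ_cons, show (c + n - (i + 1) % n) % n = m by omega]

theorem transpose_eq (s : List Char) (key : List Char) :
    columnar_transposition s key = transposeB s key := by
  by_cases hn : key.length = 0
  · have hkey : key = [] := List.length_eq_zero_iff.mp hn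
    subst hkey
    rfl
  · have hn' : 0 < key.length := Nat.pos_of_ne_zero hn
    simp only [columnar_transposition, transposeB]
    congr 1
    apply List.map_congr_left
    intro i hi
    rw [PySem.List.mem_sorted, PySem.List.mem_pyRange_one] at hi
    obtain ⟨h0, h1⟩ := hi
    have hieq : i = ((i.toNat : Nat) : Int) := (Int.toNat_of_nonneg h0).symm
    rw [hieq, PySem.List.pyGetD_natCast]
    have hcn : i.toNat < key.length := by omega
    rw [ctFill_getD key.length hn' s 0 _ (by simp) i.toNat hcn]
    rw [slice?_stride s i.toNat key.length hn']
    rw [List.getD_replicate _ hcn]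
    rw [show (i.toNat + key.length - 0 % key.length) % key.length = i.toNat by
      rw [Nat.zero_mod, Nat.sub_zero, Nat.add_mod_right, Nat.mod_eq_of_lt hcn]]
    simp

theorem join_nil_flatten (ps : List (List Char)) : PySem.Chars.join [] ps = ps.flatten := by
  induction ps with
  | nil => rfl
  | cons p ps ih =>
    cases ps with
    | nil => simp [PySem.Chars.join_singleton]
    | cons q r =>
      rw [PySem.Chars.join_cons_cons]
      simp_all

theorem split_eq_regroup (s : List Char) (k : List Char) :
    split_into_groups s k = regroupB s k.length := rfl

-- ===== VERDICT (by name: the statement is the Claim_ definition above) =====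
theorem adfgvx_encrypt_spec : Claim_equal_adfgvx_encrypt := by
  intro text key matrix _hd _hp
  unfold Spec_adfgvx_encrypt adfgvx_encrypt adfgvx_encrypt_alt
  rw [substA_eq_pieces]
  cases hp : piecesB (posTable matrix) text.toList with
  | none => simp
  | some ps =>
    simp only [Option.map_some, List.nil_append]
    rw [transpose_eq, join_nil_flatten, split_eq_regroup]
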